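-- pv_equiv track=rewrite | github.com/bok9504/Lab_work | data_func.py | contiueNum
-- ===== SOURCE A (Python) =====
-- def contiueNum(queue, conNum):
--
--     packet = []
--     turnNum = 0
--     accident = 0
--
--     if len(queue) == 0:
--         return packet
--
--     v = queue.pop(0)
--
--     while len(queue)>0:
--         vv = queue.pop(0)
--
--         if v+1 == vv:
--             v = vv
--             turnNum = turnNum + 1
--             if turnNum > conNum -2:
--                 accident = 1
--
--         else:
--             if accident == 0:
--                 v = vv
--                 turnNum = 0
--             else:
--                 packet.append(v - int(turnNum/2))
--                 v = vv
--                 turnNum = 0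
--                 accident = 0
--
--     return packet
-- ===== SOURCE B (Python) =====
-- def contiueNum(queue, conNum):
--     # Two-phase: first group the queue into maximal runs of strictly consecutive
--     # integers, then record the midpoint of each sufficiently long run.
--     # The trailing run is deliberately never recorded (as in the original).
--     if not queue:
--         return []
--     runs = []
--     cur = [queue[0]]
--     for x in queue[1:]:
--         if x == cur[-1] + 1:
--             cur.append(x)
--         else:
--             runs.append(cur)
--             cur = [x]
--     need = conNum if conNum > 2 else 2
--     return [r[-1] - (len(r) - 1) // 2 for r in runs if len(r) >= need]
-- ===== Notes on version B (the rewrite author's own statement) =====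
-- stated objective: alternative
-- what changed: Replaces A's destructive pop-driven state machine with turnNum/accident flags by a two-phase computation: first group the list into maximal consecutive runs, then filter and map the runs (the trailing run is never recorded, as in A) to their midpoint values.
import Mathlib
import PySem

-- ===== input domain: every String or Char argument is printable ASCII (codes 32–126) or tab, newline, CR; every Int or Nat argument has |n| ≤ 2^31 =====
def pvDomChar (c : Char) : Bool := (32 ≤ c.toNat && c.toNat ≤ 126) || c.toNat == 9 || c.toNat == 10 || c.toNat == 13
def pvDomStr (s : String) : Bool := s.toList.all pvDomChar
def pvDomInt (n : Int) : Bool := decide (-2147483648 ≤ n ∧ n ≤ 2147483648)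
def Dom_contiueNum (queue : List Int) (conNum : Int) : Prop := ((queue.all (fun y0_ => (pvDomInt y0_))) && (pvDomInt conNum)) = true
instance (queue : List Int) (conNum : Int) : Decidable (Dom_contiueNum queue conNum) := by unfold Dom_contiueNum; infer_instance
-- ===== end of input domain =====

-- B replaces A's pop-driven state machine (turnNum/accident flags) by a two-phase
-- computation: group the queue into maximal consecutive runs, then filter/map the
-- runs (except the trailing one) to midpoints; objective: alternative decomposition.
-- NOTE: Python A empties its `queue` argument in place (pop(0)); B does not mutate
-- it — the equivalence proved here is about the RETURN value only.


-- ===== PORT A =====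
-- the while loop of A: state (v, turnNum, accident, packet), consuming the queue
def loopA (conNum : Int) : List Int → Int → Int → Int → List Int → List Int
  | [], _v, _t, _acc, packet => packet
  | vv :: rest, v, turnNum, accident, packet =>
    if v + 1 = vv then
      let t := turnNum + 1
      let acc := if t > conNum - 2 then (1 : Int) else accident
      loopA conNum rest vv t acc packet
    else
      if accident = 0 then
        loopA conNum rest vv 0 0 packet
      else
        -- int(turnNum/2): turnNum is always ≥ 0 here, so Int division is exact
        loopA conNum rest vv 0 0 (packet ++ [v - turnNum / 2])

def contiueNum (queue : List Int) (conNum : Int) : List Int :=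
  match queue with
  | [] => []
  | v :: rest => loopA conNum rest v 0 0 []

-- ===== PORT B =====
-- phase 1 of B: collect the maximal consecutive runs (the trailing run `cur` is dropped)
def altRuns : List Int → List Int → List (List Int) → List (List Int)
  | [], _cur, runs => runs
  | x :: rest, cur, runs =>
    if x = cur.getLastD 0 + 1 then altRuns rest (cur ++ [x]) runs
    else altRuns rest [x] (runs ++ [cur])

def contiueNum_alt (queue : List Int) (conNum : Int) : List Int :=
  match queue with
  | [] => []
  | q0 :: qrest =>
    let runs := altRuns qrest [q0] []
    let need := if conNum > 2 then conNum else 2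
    (runs.filter (fun r => need ≤ (r.length : Int))).map
      (fun r => r.getLastD 0 - ((r.length : Int) - 1) / 2)

-- ===== PRECONDITION & SPEC =====
def Spec_contiueNum (queue : List Int) (conNum : Int) (out : List Int) : Prop := out = contiueNum_alt queue conNum
instance (queue : List Int) (conNum : Int) (out : List Int) : Decidable (Spec_contiueNum queue conNum out) := by unfold Spec_contiueNum; infer_instance

-- ===== CLAIM (what is proved, stated in full; the proofs are below) =====
def Claim_equal_contiueNum : Prop := ∀ (queue : List Int) (conNum : Int), Dom_contiueNum queue conNum → Spec_contiueNum queue conNum (contiueNum queue conNum)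

-- ===== LEMMAS AND PROOFS =====

-- B's output for the remaining input `rest` when the current (unfinished) run is `cur`
def outB (conNum : Int) (rest cur : List Int) : List Int :=
  ((altRuns rest cur []).filter (fun r => (if conNum > 2 then conNum else 2) ≤ (r.length : Int))).map
    (fun r => r.getLastD 0 - ((r.length : Int) - 1) / 2)

lemma altRuns_runs (rest : List Int) : ∀ (cur : List Int) (runs : List (List Int)),
    altRuns rest cur runs = runs ++ altRuns rest cur [] := by
  induction rest with
  | nil => intro cur runs; simp [altRuns]
  | cons x rest ih =>
    intro cur runs
    simp only [altRuns]
    split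
    · exact ih _ _
    · rw [ih _ (runs ++ [cur]), ih _ ([] ++ [cur])]
      simp

lemma key (conNum : Int) (rest : List Int) : ∀ (cur packet : List Int), cur ≠ [] →
    loopA conNum rest (cur.getLastD 0) ((cur.length : Int) - 1)
      (if (cur.length : Int) - 1 > conNum - 2 ∧ 1 ≤ (cur.length : Int) - 1 then 1 else 0) packet
    = packet ++ outB conNum rest cur := by
  induction rest with
  | nil => intro cur packet _; simp [loopA, outB, altRuns]
  | cons vv rest ih =>
    intro cur packet hcur
    have hlen : 1 ≤ cur.length := List.length_pos_iff.mpr hcur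
    simp only [loopA]
    by_cases hc : cur.getLastD 0 + 1 = vv
    · -- run continues
      rw [if_pos hc]
      have hB : outB conNum (vv :: rest) cur = outB conNum rest (cur ++ [vv]) := by
        simp only [outB, altRuns]
        rw [if_pos hc.symm]
      rw [hB]
      have hIH := ih (cur ++ [vv]) packet (by simp)
      have hlast : (cur ++ [vv]).getLastD 0 = vv := by simp
      have hlen' : ((cur ++ [vv]).length : Int) - 1 = ((cur.length : Int) - 1) + 1 := by
        simp
      rw [hlast, hlen'] at hIH
      rw [← hIH]
      congr 1
      split_ifs <;> omega
    · -- run breaks at vv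
      rw [if_neg hc]
      have hB : outB conNum (vv :: rest) cur
          = (if (if conNum > 2 then conNum else 2) ≤ (cur.length : Int)
             then [cur.getLastD 0 - ((cur.length : Int) - 1) / 2] else [])
            ++ outB conNum rest [vv] := by
        simp only [outB, altRuns]
        rw [if_neg (show ¬ (vv = cur.getLastD 0 + 1) from fun h => hc h.symm), altRuns_runs rest [vv]]
        simp only [List.nil_append, List.singleton_append, List.filter_cons]
        by_cases hne : (if conNum > 2 then conNum else 2) ≤ (cur.length : Int)
        · simp [hne]
        · simp [hne]
      rw [hB]
      have hstep : ∀ pk : List Int, loopA conNum rest vv 0 0 pk = pk ++ outB conNum rest [vv] := by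
        intro pk
        have := ih [vv] pk (by simp)
        simpa [List.getLastD] using this
      by_cases hC : (cur.length : Int) - 1 > conNum - 2 ∧ 1 ≤ (cur.length : Int) - 1
      · rw [if_pos hC, if_neg (by norm_num), hstep,
           if_pos (show (if conNum > 2 then conNum else 2) ≤ (cur.length : Int) by
             split <;> omega)]
        simp
      · rw [if_neg hC, if_pos rfl, hstep,
           if_neg (show ¬ (if conNum > 2 then conNum else 2) ≤ (cur.length : Int) by
             split <;> omega)]
        simp

-- ===== VERDICT (by name: the statement is the Claim_ definition above) =====
theorem contiueNum_spec : Claim_equal_contiueNum := by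
  intro queue conNum _
  unfold Spec_contiueNum
  cases queue with
  | nil => rfl
  | cons q0 qrest =>
    have h := key conNum qrest [q0] [] (by simp)
    norm_num [List.getLastD] at h
    simpa [contiueNum, contiueNum_alt, outB] using h
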